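-- pv_equiv track=rewrite | github.com/BernardoNeves/M2AI-HPC | run.py | parse_thread_config
-- ===== SOURCE A (Python) =====
-- from typing import List, Dict
--
-- def parse_thread_config(thread_str: str) -> List[int]:
--     if not thread_str:
--         return []
--
--     threads = []
--
--     if "," in thread_str:
--         for part in thread_str.split(","):
--             threads.extend(parse_thread_config(part.strip()))
--     elif ":" in thread_str:
--         start, end = map(int, thread_str.split(":"))
--         threads.extend(range(start, end + 1))
--     else:
--         threads.append(int(thread_str))
--
--     return sorted(list(set(threads)))
-- ===== SOURCE B (Python) =====
-- def parse_thread_config(thread_str):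
--     if not thread_str:
--         return []
--     result = set()
--     for part in thread_str.split(','):
--         part = part.strip()
--         if not part:
--             continue
--         if ':' in part:
--             start, end = map(int, part.split(':'))
--             result.update(range(start, end + 1))
--         else:
--             result.add(int(part))
--     return sorted(result)
-- ===== Notes on version B (the rewrite author's own statement) =====
-- stated objective: simpler
-- what changed: A recurses on each comma-separated part and builds a sorted deduplicated list at every level (per-part sort plus dedup, then a second global dedup and sort); B is one flat loop over the comma-split parts that accumulates all integers into a single set and sorts once at the end.
-- crash fix: On nonempty comma-free input consisting only of whitespace, A raises ValueError when it tries to parse the whole string as an integer; B skips the part that strips to empty and returns an empty list. — e.g. on parse_thread_config(" "): A raises ValueError, B returns []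
import Mathlib
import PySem

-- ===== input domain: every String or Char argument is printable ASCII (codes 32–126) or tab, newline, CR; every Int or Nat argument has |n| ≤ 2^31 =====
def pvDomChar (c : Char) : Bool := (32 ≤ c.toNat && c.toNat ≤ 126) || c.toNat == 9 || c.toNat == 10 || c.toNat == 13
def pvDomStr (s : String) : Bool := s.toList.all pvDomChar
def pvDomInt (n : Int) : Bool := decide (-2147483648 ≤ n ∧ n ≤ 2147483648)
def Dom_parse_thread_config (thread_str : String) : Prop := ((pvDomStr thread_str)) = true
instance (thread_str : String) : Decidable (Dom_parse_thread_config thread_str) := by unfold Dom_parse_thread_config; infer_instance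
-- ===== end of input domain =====

-- B replaces A's recursion (each comma part recursively yields a sorted deduplicated sublist,
-- re-deduplicated and re-sorted at the top) with one flat loop over the comma-split parts that
-- fills a single set and sorts once at the end; objective: simpler.


-- ===== PORT A =====
-- pvSplit/pvConsHead and the lemmas up to pv_piece_lt exist only to justify the
-- termination of A's recursion (cited by name in decreasing_by): pvSplit is proved
-- equal to PySem.Chars.splitOn with a one-character separator, and every comma-split
-- piece, stripped, is strictly shorter than a string that contains a comma.
def pvSplit (c : Char) : List Char → List (List Char)
  | [] => [[]]
  | ch :: rest =>
    if ch = c then [] :: pvSplit c rest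
    else match pvSplit c rest with
      | [] => [[ch]]
      | h :: t => (ch :: h) :: t

theorem pvSplit_ne_nil (c : Char) (cs : List Char) : pvSplit c cs ≠ [] := by
  cases cs with
  | nil => simp [pvSplit]
  | cons ch rest =>
    simp only [pvSplit]
    split
    · simp
    · split <;> simp

def pvConsHead (w : List Char) : List (List Char) → List (List Char)
  | [] => [w]
  | h :: t => (w ++ h) :: t

theorem pv_go_eq (c : Char) : ∀ (fuel : Nat) (l cur : List Char) (acc : List (List Char)),
    l.length < fuel →
    PySem.Chars.splitOn.go [c] fuel l cur acc = acc.reverse ++ pvConsHead cur.reverse (pvSplit c l) := by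
  intro fuel
  induction fuel with
  | zero => intro l cur acc h; omega
  | succ f ih =>
    intro l cur acc h
    cases l with
    | nil =>
      simp [PySem.Chars.splitOn.go, pvSplit, pvConsHead]
    | cons ch rest =>
      simp only [PySem.Chars.splitOn.go]
      by_cases hc : ch = c
      · subst hc
        have hpre : [ch].isPrefixOf (ch :: rest) = true := by simp [List.isPrefixOf]
        simp only [hpre, if_pos]
        rw [ih]
        · simp [pvSplit]
          cases hps : pvSplit ch rest with
          | nil => exact absurd hps (pvSplit_ne_nil ch rest)
          | cons h t => simp [pvConsHead]
        · simpa using Nat.lt_of_succ_lt_succ h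
      · have hpre : [c].isPrefixOf (ch :: rest) = false := by
          simp [List.isPrefixOf]; exact fun hh => absurd hh.symm hc
        simp only [hpre, if_neg, Bool.false_eq_true, not_false_iff]
        rw [ih]
        · simp only [pvSplit]
          rw [if_neg hc]
          cases hps : pvSplit c rest with
          | nil => exact absurd hps (pvSplit_ne_nil c rest)
          | cons h t => simp [pvConsHead]
        · simp at h ⊢; omega

theorem pv_splitOn_singleton (c : Char) (cs : List Char) :
    PySem.Chars.splitOn cs [c] = pvSplit c cs := by
  unfold PySem.Chars.splitOn
  rw [pv_go_eq c (cs.length + 1) cs [] [] (by omega)]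
  simp only [List.reverse_nil, List.nil_append]
  cases hps : pvSplit c cs with
  | nil => exact absurd hps (pvSplit_ne_nil c cs)
  | cons h t => simp [pvConsHead]

theorem pvSplit_len_le (c : Char) : ∀ (cs : List Char), ∀ p ∈ pvSplit c cs, p.length ≤ cs.length := by
  intro cs
  induction cs with
  | nil => intro p hp; simp [pvSplit] at hp; simp [hp]
  | cons ch rest ih =>
    intro p hp
    simp only [pvSplit] at hp
    by_cases hc : ch = c
    · rw [if_pos hc] at hp
      rcases List.mem_cons.1 hp with h | h
      · simp [h]
      · have := ih p h; simp; omega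
    · rw [if_neg hc] at hp
      cases hps : pvSplit c rest with
      | nil => exact absurd hps (pvSplit_ne_nil c rest)
      | cons q t =>
        rw [hps] at hp
        rcases List.mem_cons.1 hp with h1 | h1
        · have := ih q (by rw [hps]; simp)
          simp [h1]; omega
        · have := ih p (by rw [hps]; exact List.mem_cons_of_mem _ h1)
          simp; omega

theorem pvSplit_len_lt (c : Char) : ∀ (cs : List Char), c ∈ cs → ∀ p ∈ pvSplit c cs, p.length < cs.length := by
  intro cs
  induction cs with
  | nil => intro h; simp at h
  | cons ch rest ih =>
    intro hmem p hp
    simp only [pvSplit] at hp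
    by_cases hc : ch = c
    · rw [if_pos hc] at hp
      rcases List.mem_cons.1 hp with h | h
      · simp [h]
      · have := pvSplit_len_le c rest p h; simp; omega
    · rw [if_neg hc] at hp
      have hr : c ∈ rest := by
        rcases List.mem_cons.1 hmem with h | h
        · exact absurd h.symm hc
        · exact h
      cases hps : pvSplit c rest with
      | nil => exact absurd hps (pvSplit_ne_nil c rest)
      | cons q t =>
        rw [hps] at hp
        rcases List.mem_cons.1 hp with h1 | h1
        · have := ih hr q (by rw [hps]; simp)
          simp [h1]; omega
        · have := ih hr p (by rw [hps]; exact List.mem_cons_of_mem _ h1)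
          simp; omega

theorem pv_strip_len_le (p : List Char) : (PySem.Chars.strip p).length ≤ p.length := by
  unfold PySem.Chars.strip PySem.Chars.rstrip PySem.Chars.lstrip
  have h1 := List.length_dropWhile_le (p := PySem.Chars.isspace) (l := p)
  have h2 := List.length_dropWhile_le (p := PySem.Chars.isspace)
    (l := (List.dropWhile PySem.Chars.isspace p).reverse)
  simp at h2 ⊢
  omega

theorem pv_isIn_singleton (c : Char) (cs : List Char) :
    PySem.Chars.isIn [c] cs = true ↔ c ∈ cs := by
  rw [PySem.Chars.isIn_iff_infix]
  constructor
  · intro h; exact (List.singleton_sublist).1 h.sublist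
  · intro h
    rcases List.append_of_mem h with ⟨s, t, rfl⟩
    exact ⟨s, t, by simp⟩

theorem pv_piece_lt (cs p : List Char) (hp : p ∈ PySem.Chars.splitOn cs [','])
    (hc : PySem.Chars.isIn [','] cs = true) :
    (PySem.Chars.strip p).length < cs.length := by
  rw [pv_splitOn_singleton] at hp
  have := pvSplit_len_lt ',' cs ((pv_isIn_singleton ',' cs).1 hc) p hp
  have := pv_strip_len_le p
  omega

-- Port of A: literal transliteration (recursion on comma parts; per-call sorted(set(...))).
def parse_thread_config_core (cs : List Char) : List Int :=
  if _h0 : cs = [] then []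
  else
    let threads : List Int :=
      if hc : PySem.Chars.isIn [','] cs = true then
        (PySem.Chars.splitOn cs [',']).attach.flatMap
          (fun part => parse_thread_config_core (PySem.Chars.strip part.1))
      else if PySem.Chars.isIn [':'] cs then
        match PySem.Chars.splitOn cs [':'] with
        | [a, b] =>
          PySem.List.pyRange ((PySem.Int.ofChars? a).getD 0)
            (((PySem.Int.ofChars? b).getD 0) + 1) 1
        | _ => []
      else [(PySem.Int.ofChars? cs).getD 0]
    PySem.List.sorted (PySem.Set.ofList threads) (fun x => x) false
termination_by cs.length
decreasing_by
  exact pv_piece_lt cs part.1 part.2 hc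

def parse_thread_config (thread_str : String) : List Int :=
  parse_thread_config_core thread_str.toList

-- ===== PORT B =====
def parse_thread_config_alt_core (cs : List Char) : List Int :=
  if cs = [] then []
  else
    let result : PySem.Set Int :=
      (PySem.Chars.splitOn cs [',']).foldl
        (fun acc part =>
          let p := PySem.Chars.strip part
          if p = [] then acc
          else if PySem.Chars.isIn [':'] p then
            match PySem.Chars.splitOn p [':'] with
            | [a, b] =>
              PySem.Set.update acc
                (PySem.List.pyRange ((PySem.Int.ofChars? a).getD 0)
                  (((PySem.Int.ofChars? b).getD 0) + 1) 1)
            | _ => acc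
          else PySem.Set.add acc ((PySem.Int.ofChars? p).getD 0))
        PySem.Set.empty
    PySem.List.sorted result (fun x => x) false

def parse_thread_config_alt (thread_str : String) : List Int :=
  parse_thread_config_alt_core thread_str.toList

-- ===== PRECONDITION & SPEC =====
def pvOkCore (q : List Char) : Bool :=
  if PySem.Chars.isIn [':'] q then
    match PySem.Chars.splitOn q [':'] with
    | [a, b] => (PySem.Int.ofChars? a).isSome && (PySem.Int.ofChars? b).isSome
    | _ => false
  else (PySem.Int.ofChars? q).isSome

def Pre_parse_thread_config (thread_str : String) : Prop :=
  thread_str.toList = [] ∨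
    (if PySem.Chars.isIn [','] thread_str.toList then
      (PySem.Chars.splitOn thread_str.toList [',']).all
        (fun p => decide (PySem.Chars.strip p = []) || pvOkCore (PySem.Chars.strip p))
    else pvOkCore thread_str.toList) = true

instance (thread_str : String) : Decidable (Pre_parse_thread_config thread_str) := by
  unfold Pre_parse_thread_config; infer_instance

def pvWitness_parse_thread_config : String := "1:3, 7 ,,2"

-- Pre_ excludes exactly the inputs where A raises ValueError: a malformed integer piece,
-- or a colon-containing piece that does not split into exactly two parsable integers.
-- A raises ValueError on nonempty comma-free input consisting only of whitespace (it parses the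
-- whole string as an integer); B returns an empty list there because its loop skips such a part.
def Raises_parse_thread_config (thread_str : String) : Prop :=
  thread_str.toList ≠ [] ∧ PySem.Chars.isIn [','] thread_str.toList = false ∧
    PySem.Chars.strip thread_str.toList = []

instance (thread_str : String) : Decidable (Raises_parse_thread_config thread_str) := by
  unfold Raises_parse_thread_config; infer_instance

def pvRaiseWitness_parse_thread_config : String := " "
def pvRaiseWitnessOut_parse_thread_config : List Int := []

def Spec_parse_thread_config (thread_str : String) (out : List Int) : Prop := out = parse_thread_config_alt thread_str
instance (thread_str : String) (out : List Int) : Decidable (Spec_parse_thread_config thread_str out) := by unfold Spec_parse_thread_config; infer_instance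

-- ===== CLAIM =====
def Claim_equal_parse_thread_config : Prop := ∀ (thread_str : String), Dom_parse_thread_config thread_str → Pre_parse_thread_config thread_str → Spec_parse_thread_config thread_str (parse_thread_config thread_str)

def Claim_raises_parse_thread_config : Prop := (∀ (thread_str : String), Dom_parse_thread_config thread_str → Raises_parse_thread_config thread_str → ¬ Pre_parse_thread_config thread_str) ∧ (Dom_parse_thread_config (pvRaiseWitness_parse_thread_config) ∧ Raises_parse_thread_config (pvRaiseWitness_parse_thread_config) ∧ parse_thread_config_alt (pvRaiseWitness_parse_thread_config) = pvRaiseWitnessOut_parse_thread_config)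

-- ===== LEMMAS AND PROOFS =====

theorem pvSplit_not_mem {c : Char} {cs : List Char} (h : c ∉ cs) : pvSplit c cs = [cs] := by
  induction cs with
  | nil => rfl
  | cons ch rest ih =>
    simp only [pvSplit]
    rw [if_neg (by intro hh; exact h (by simp [hh]))]
    rw [ih (by intro hh; exact h (List.mem_cons_of_mem _ hh))]

theorem pvSplit_pieces_not_mem {c : Char} {cs : List Char} {p : List Char}
    (hp : p ∈ pvSplit c cs) : c ∉ p := by
  induction cs generalizing p with
  | nil => simp [pvSplit] at hp; simp [hp]
  | cons ch rest ih =>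
    simp only [pvSplit] at hp
    by_cases hc : ch = c
    · rw [if_pos hc] at hp
      rcases List.mem_cons.1 hp with h | h
      · simp [h]
      · exact ih h
    · rw [if_neg hc] at hp
      cases hps : pvSplit c rest with
      | nil => exact absurd hps (pvSplit_ne_nil c rest)
      | cons q t =>
        rw [hps] at hp
        rcases List.mem_cons.1 hp with h | h
        · subst h
          intro hmem
          rcases List.mem_cons.1 hmem with h1 | h1
          · exact hc h1.symm
          · exact ih (by rw [hps]; simp) h1
        · exact ih (by rw [hps]; exact List.mem_cons_of_mem _ h)

theorem pv_strip_decomp (cs : List Char) : ∃ w₁ w₂,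
    (∀ x ∈ w₁, PySem.Chars.isspace x = true) ∧ (∀ x ∈ w₂, PySem.Chars.isspace x = true) ∧
    cs = w₁ ++ PySem.Chars.strip cs ++ w₂ := by
  refine ⟨cs.takeWhile PySem.Chars.isspace,
    ((List.dropWhile PySem.Chars.isspace cs).reverse.takeWhile PySem.Chars.isspace).reverse,
    ?_, ?_, ?_⟩
  · intro x hx; exact List.mem_takeWhile_imp hx
  · intro x hx; exact List.mem_takeWhile_imp (List.mem_reverse.1 hx)
  · unfold PySem.Chars.strip PySem.Chars.rstrip PySem.Chars.lstrip
    have h2 : List.dropWhile PySem.Chars.isspace cs =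
        (List.dropWhile PySem.Chars.isspace (List.dropWhile PySem.Chars.isspace cs).reverse).reverse ++
        (List.takeWhile PySem.Chars.isspace (List.dropWhile PySem.Chars.isspace cs).reverse).reverse := by
      have htd := List.takeWhile_append_dropWhile (p := PySem.Chars.isspace)
        (l := (List.dropWhile PySem.Chars.isspace cs).reverse)
      conv_lhs => rw [← List.reverse_reverse (List.dropWhile PySem.Chars.isspace cs), ← htd,
        List.reverse_append]
    conv_lhs => rw [← List.takeWhile_append_dropWhile (p := PySem.Chars.isspace) (l := cs), h2]
    simp

theorem pv_dom_ws {c : Char} (hd : pvDomChar c = true) (hs : PySem.Chars.isspace c = true) :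
    PySem.Int.isIntSpace c = true := by
  unfold pvDomChar at hd
  unfold PySem.Chars.isspace at hs
  unfold PySem.Int.isIntSpace
  have h9 : ('\t' : Char).toNat = 9 := by decide
  have h10 : ('\n' : Char).toNat = 10 := by decide
  simp only [Bool.or_eq_true, Bool.and_eq_true, decide_eq_true_eq, beq_iff_eq] at hd hs ⊢
  have hn : c.toNat = 32 ∨ c.toNat = 9 ∨ c.toNat = 10 ∨ c.toNat = 11 ∨ c.toNat = 12 ∨ c.toNat = 13 := by omega
  have hinj : ∀ (d : Char), c.toNat = d.toNat → c = d := by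
    intro d h
    apply Char.ext
    have : c.val.toNat = d.val.toNat := h
    exact UInt32.toNat_inj.mp this
  rcases hn with h | h | h | h | h | h
  · simp [hinj ' ' (by rw [h]; decide)]
  · simp [hinj '\t' (by rw [h]; decide)]
  · simp [hinj '\n' (by rw [h]; decide)]
  · simp [hinj '\x0b' (by rw [h]; decide)]
  · simp [hinj '\x0c' (by rw [h]; decide)]
  · simp [hinj '\x0d' (by rw [h]; decide)]

theorem pv_ofChars_ws_left {w a : List Char} (hw : ∀ x ∈ w, PySem.Int.isIntSpace x = true) :
    PySem.Int.ofChars? (w ++ a) = PySem.Int.ofChars? a := by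
  have hnil : List.dropWhile PySem.Int.isIntSpace w = [] := by
    rw [List.dropWhile_eq_nil_iff]; exact fun x hx => hw x hx
  unfold PySem.Int.ofChars?
  rw [List.dropWhile_append, hnil]
  simp

theorem pv_ofChars_ws_right {a w : List Char} (hw : ∀ x ∈ w, PySem.Int.isIntSpace x = true) :
    PySem.Int.ofChars? (a ++ w) = PySem.Int.ofChars? a := by
  have hnil : List.dropWhile PySem.Int.isIntSpace w = [] := by
    rw [List.dropWhile_eq_nil_iff]; exact fun x hx => hw x hx
  have hnilr : List.dropWhile PySem.Int.isIntSpace w.reverse = [] := by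
    rw [List.dropWhile_eq_nil_iff]; exact fun x hx => hw x (List.mem_reverse.1 hx)
  unfold PySem.Int.ofChars?
  rw [List.dropWhile_append, hnil]
  by_cases he : (List.dropWhile PySem.Int.isIntSpace a).isEmpty
  · rw [if_pos he]
    rw [List.isEmpty_iff] at he
    rw [he]
  · rw [if_neg (by simpa using he)]
    rw [List.reverse_append, List.dropWhile_append, hnilr]
    simp

theorem pv_ofChars_nil : PySem.Int.ofChars? [] = none := by decide

theorem pv_ofChars_strip {cs : List Char} (hdom : ∀ x ∈ cs, pvDomChar x = true) :
    PySem.Int.ofChars? (PySem.Chars.strip cs) = PySem.Int.ofChars? cs := by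
  obtain ⟨w₁, w₂, hw₁, hw₂, hdec⟩ := pv_strip_decomp cs
  have hint₁ : ∀ x ∈ w₁, PySem.Int.isIntSpace x = true := fun x hx =>
    pv_dom_ws (hdom x (by rw [hdec]; simp [hx])) (hw₁ x hx)
  have hint₂ : ∀ x ∈ w₂, PySem.Int.isIntSpace x = true := fun x hx =>
    pv_dom_ws (hdom x (by rw [hdec]; simp [hx])) (hw₂ x hx)
  conv_rhs => rw [hdec]
  rw [List.append_assoc, pv_ofChars_ws_left hint₁, pv_ofChars_ws_right hint₂]

theorem pv_mem_strip {c : Char} {cs : List Char} (h : c ∈ PySem.Chars.strip cs) : c ∈ cs := by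
  obtain ⟨w₁, w₂, _, _, hdec⟩ := pv_strip_decomp cs
  rw [hdec]; simp [h]

theorem pv_mem_strip_of_not_ws {c : Char} {cs : List Char} (hc : PySem.Chars.isspace c = false)
    (h : c ∈ cs) : c ∈ PySem.Chars.strip cs := by
  obtain ⟨w₁, w₂, hw₁, hw₂, hdec⟩ := pv_strip_decomp cs
  rw [hdec] at h
  simp at h
  rcases h with h | h | h
  · rw [hw₁ c h] at hc; cases hc
  · exact h
  · rw [hw₂ c h] at hc; cases hc

theorem pv_strip_nil_ws {cs : List Char} (h : PySem.Chars.strip cs = []) :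
    ∀ x ∈ cs, PySem.Chars.isspace x = true := by
  obtain ⟨w₁, w₂, hw₁, hw₂, hdec⟩ := pv_strip_decomp cs
  rw [h] at hdec
  intro x hx
  rw [hdec] at hx
  simp at hx
  rcases hx with h1 | h1
  · exact hw₁ x h1
  · exact hw₂ x h1

theorem pv_ofChars_all_ws {cs : List Char} (hdom : ∀ x ∈ cs, pvDomChar x = true)
    (h : ∀ x ∈ cs, PySem.Chars.isspace x = true) : PySem.Int.ofChars? cs = none := by
  have h2 := pv_ofChars_ws_left (a := ([] : List Char)) (w := cs)
    (fun x hx => pv_dom_ws (hdom x hx) (h x hx))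
  simpa [pv_ofChars_nil] using h2

def pvModLast (w : List Char) : List (List Char) → List (List Char)
  | [] => []
  | [h] => [h ++ w]
  | h :: t => h :: pvModLast w t

theorem pvSplit_ws_left {c : Char} {w l : List Char} (hw : ∀ x ∈ w, x ≠ c) :
    pvSplit c (w ++ l) = pvConsHead w (pvSplit c l) := by
  induction w with
  | nil =>
    simp only [List.nil_append]
    cases hps : pvSplit c l with
    | nil => exact absurd hps (pvSplit_ne_nil c l)
    | cons h t => simp [pvConsHead]
  | cons ch w' ih =>
    simp only [List.cons_append, pvSplit]
    rw [if_neg (hw ch (by simp))]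
    rw [ih (fun x hx => hw x (List.mem_cons_of_mem _ hx))]
    cases hps : pvSplit c l with
    | nil => exact absurd hps (pvSplit_ne_nil c l)
    | cons h t => simp [pvConsHead]

theorem pvSplit_ws_right {c : Char} {l w : List Char} (hw : ∀ x ∈ w, x ≠ c) :
    pvSplit c (l ++ w) = pvModLast w (pvSplit c l) := by
  induction l with
  | nil =>
    rw [List.nil_append, pvSplit_not_mem (fun h => hw c h rfl)]
    simp [pvSplit, pvModLast]
  | cons ch l' ih =>
    simp only [List.cons_append, pvSplit]
    by_cases hc : ch = c
    · rw [if_pos hc, if_pos hc, ih]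
      cases hps : pvSplit c l' with
      | nil => exact absurd hps (pvSplit_ne_nil c l')
      | cons h t => cases t <;> simp [pvModLast]
    · rw [if_neg hc, if_neg hc, ih]
      cases hps : pvSplit c l' with
      | nil => exact absurd hps (pvSplit_ne_nil c l')
      | cons h t =>
        cases t with
        | nil => simp [pvModLast]
        | cons x xs => simp [pvModLast]

def pvContrib (part : List Char) : List Int :=
  if PySem.Chars.strip part = [] then []
  else if PySem.Chars.isIn [':'] (PySem.Chars.strip part) then
    match PySem.Chars.splitOn (PySem.Chars.strip part) [':'] with
    | [a, b] =>
      PySem.List.pyRange ((PySem.Int.ofChars? a).getD 0)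
        (((PySem.Int.ofChars? b).getD 0) + 1) 1
    | _ => []
  else [(PySem.Int.ofChars? (PySem.Chars.strip part)).getD 0]

theorem pv_step_eq :
    (fun (acc : PySem.Set Int) (part : List Char) =>
        let p := PySem.Chars.strip part
        if p = [] then acc
        else if PySem.Chars.isIn [':'] p then
          match PySem.Chars.splitOn p [':'] with
          | [a, b] =>
            PySem.Set.update acc
              (PySem.List.pyRange ((PySem.Int.ofChars? a).getD 0)
                (((PySem.Int.ofChars? b).getD 0) + 1) 1)
          | _ => acc
        else PySem.Set.add acc ((PySem.Int.ofChars? p).getD 0)) =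
    (fun acc part => PySem.Set.update acc (pvContrib part)) := by
  funext acc part
  simp only [pvContrib]
  by_cases h0 : PySem.Chars.strip part = []
  · simp [h0, PySem.Set.update]
  · rw [if_neg h0, if_neg h0]
    by_cases h1 : PySem.Chars.isIn [':'] (PySem.Chars.strip part) = true
    · rw [if_pos h1, if_pos h1]
      cases hps : PySem.Chars.splitOn (PySem.Chars.strip part) [':'] with
      | nil => simp [PySem.Set.update]
      | cons a t =>
        cases t with
        | nil => simp [PySem.Set.update]
        | cons b t2 =>
          cases t2 with
          | nil => rfl
          | cons c t3 => simp [PySem.Set.update]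
    · rw [if_neg h1, if_neg h1]
      simp [PySem.Set.update]

theorem pv_mem_foldl (l : List (List Char)) (s : PySem.Set Int) (x : Int) :
    (x ∈ l.foldl (fun acc p => PySem.Set.update acc (pvContrib p)) s) ↔
      x ∈ s ∨ ∃ p ∈ l, x ∈ pvContrib p := by
  induction l generalizing s with
  | nil => simp
  | cons p l ih =>
    simp only [List.foldl_cons, ih, PySem.Set.mem_update]
    constructor
    · rintro ((h | h) | ⟨q, hq, hx⟩)
      · exact Or.inl h
      · exact Or.inr ⟨p, by simp, h⟩
      · exact Or.inr ⟨q, List.mem_cons_of_mem _ hq, hx⟩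
    · rintro (h | ⟨q, hq, hx⟩)
      · exact Or.inl (Or.inl h)
      · rcases List.mem_cons.1 hq with h1 | h1
        · exact Or.inl (Or.inr (h1 ▸ hx))
        · exact Or.inr ⟨q, h1, hx⟩

theorem pv_nodup_foldl (l : List (List Char)) (s : PySem.Set Int) (hs : s.Nodup) :
    (l.foldl (fun acc p => PySem.Set.update acc (pvContrib p)) s).Nodup := by
  induction l generalizing s with
  | nil => exact hs
  | cons p l ih => exact ih _ (PySem.Set.nodup_update _ _ hs)

theorem pv_mem_core_piece (part : List Char) (hnc : (',' : Char) ∉ PySem.Chars.strip part)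
    (x : Int) :
    x ∈ parse_thread_config_core (PySem.Chars.strip part) ↔ x ∈ pvContrib part := by
  rw [parse_thread_config_core]
  by_cases hq : PySem.Chars.strip part = []
  · rw [dif_pos hq]
    simp [pvContrib, hq]
  · rw [dif_neg hq]
    have hcomma : ¬ PySem.Chars.isIn [','] (PySem.Chars.strip part) = true := by
      rw [pv_isIn_singleton]; exact hnc
    rw [dif_neg hcomma]
    simp only [pvContrib, if_neg hq]
    by_cases h1 : PySem.Chars.isIn [':'] (PySem.Chars.strip part) = true
    · rw [if_pos h1]
      cases hps : PySem.Chars.splitOn (PySem.Chars.strip part) [':'] with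
      | nil => simp [PySem.List.mem_sorted]
      | cons a t =>
        cases t with
        | nil => simp [PySem.List.mem_sorted]
        | cons b t2 =>
          cases t2 with
          | nil => simp [PySem.List.mem_sorted, PySem.Set.mem_ofList]
          | cons c t3 => simp [PySem.List.mem_sorted]
    · rw [if_neg h1]
      simp [PySem.List.mem_sorted, PySem.Set.mem_ofList]

theorem pvModLast_ne_nil (w : List Char) (l : List (List Char)) (hl : l ≠ []) :
    pvModLast w l ≠ [] := by
  cases l with
  | nil => exact absurd rfl hl
  | cons h t => cases t <;> simp [pvModLast]

theorem pv_ws_ne {x c : Char} (hx : PySem.Chars.isspace x = true)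
    (hc : PySem.Chars.isspace c = false) : x ≠ c := by
  intro h; rw [h, hc] at hx; cases hx

theorem pv_isspace_colon : PySem.Chars.isspace ':' = false := by decide

theorem pv_core_eq (cs : List Char) (hdom : ∀ x ∈ cs, pvDomChar x = true)
    (hpre : cs = [] ∨ (if PySem.Chars.isIn [','] cs then
        (PySem.Chars.splitOn cs [',']).all
          (fun p => decide (PySem.Chars.strip p = []) || pvOkCore (PySem.Chars.strip p))
      else pvOkCore cs) = true) :
    parse_thread_config_core cs = parse_thread_config_alt_core cs := by
  by_cases hcs : cs = []
  · rw [parse_thread_config_core, dif_pos hcs]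
    unfold parse_thread_config_alt_core
    rw [if_pos hcs]
  · rw [parse_thread_config_core, dif_neg hcs]
    unfold parse_thread_config_alt_core
    rw [if_neg hcs, pv_step_eq]
    by_cases hc : PySem.Chars.isIn [','] cs = true
    · rw [dif_pos hc]
      refine PySem.List.sorted_eq_sorted_of_perm _ _ _ (fun a b h => h) ?_
      rw [List.perm_ext_iff_of_nodup (PySem.Set.nodup_ofList _)
        (pv_nodup_foldl _ PySem.Set.empty List.nodup_nil)]
      intro x
      rw [PySem.Set.mem_ofList, pv_mem_foldl]
      simp only [List.mem_flatMap, List.mem_attach, true_and, PySem.Set.empty,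
        List.not_mem_nil, false_or]
      constructor
      · rintro ⟨⟨p, hp⟩, hx⟩
        refine ⟨p, hp, ?_⟩
        have hnc : (',' : Char) ∉ PySem.Chars.strip p := by
          intro hmem
          have := pvSplit_pieces_not_mem (by rw [← pv_splitOn_singleton]; exact hp)
          exact this (pv_mem_strip hmem)
        exact (pv_mem_core_piece p hnc x).1 hx
      · rintro ⟨p, hp, hx⟩
        refine ⟨⟨p, hp⟩, ?_⟩
        have hnc : (',' : Char) ∉ PySem.Chars.strip p := by
          intro hmem
          have := pvSplit_pieces_not_mem (by rw [← pv_splitOn_singleton]; exact hp)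
          exact this (pv_mem_strip hmem)
        exact (pv_mem_core_piece p hnc x).2 hx
    · rw [dif_neg hc]
      have hnotmem : (',' : Char) ∉ cs := fun h => hc ((pv_isIn_singleton _ _).2 h)
      have hsplit : PySem.Chars.splitOn cs [','] = [cs] := by
        rw [pv_splitOn_singleton, pvSplit_not_mem hnotmem]
      rw [hsplit]
      simp only [List.foldl_cons, List.foldl_nil]
      have hupd : PySem.Set.update PySem.Set.empty (pvContrib cs) = PySem.Set.ofList (pvContrib cs) := rfl
      rw [hupd]
      refine PySem.List.sorted_eq_sorted_of_perm _ _ _ (fun a b h => h) ?_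
      rw [List.perm_ext_iff_of_nodup (PySem.Set.nodup_ofList _) (PySem.Set.nodup_ofList _)]
      intro x
      rw [PySem.Set.mem_ofList, PySem.Set.mem_ofList]
      obtain ⟨w₁, w₂, hw₁, hw₂, hdec⟩ := pv_strip_decomp cs
      have hne₁ : ∀ y ∈ w₁, y ≠ ':' := fun y hy => pv_ws_ne (hw₁ y hy) pv_isspace_colon
      have hne₂ : ∀ y ∈ w₂, y ≠ ':' := fun y hy => pv_ws_ne (hw₂ y hy) pv_isspace_colon
      have hint₁ : ∀ y ∈ w₁, PySem.Int.isIntSpace y = true := fun y hy =>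
        pv_dom_ws (hdom y (by rw [hdec]; simp [hy])) (hw₁ y hy)
      have hint₂ : ∀ y ∈ w₂, PySem.Int.isIntSpace y = true := fun y hy =>
        pv_dom_ws (hdom y (by rw [hdec]; simp [hy])) (hw₂ y hy)
      by_cases hcol : PySem.Chars.isIn [':'] cs = true
      · -- colon present
        have hcolmem : (':' : Char) ∈ cs := (pv_isIn_singleton _ _).1 hcol
        have hqmem : (':' : Char) ∈ PySem.Chars.strip cs :=
          pv_mem_strip_of_not_ws pv_isspace_colon hcolmem
        have hqne : PySem.Chars.strip cs ≠ [] := by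
          intro h; rw [h] at hqmem; cases hqmem
        have hqcol : PySem.Chars.isIn [':'] (PySem.Chars.strip cs) = true :=
          (pv_isIn_singleton _ _).2 hqmem
        rw [if_pos hcol]
        simp only [pvContrib, if_neg hqne, if_pos hqcol]
        have hshape : pvSplit ':' cs =
            pvConsHead w₁ (pvModLast w₂ (pvSplit ':' (PySem.Chars.strip cs))) := by
          conv_lhs => rw [hdec]
          rw [List.append_assoc, pvSplit_ws_left hne₁, pvSplit_ws_right hne₂]
        rw [pv_splitOn_singleton, pv_splitOn_singleton, hshape]
        cases hps : pvSplit ':' (PySem.Chars.strip cs) with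
        | nil => exact absurd hps (pvSplit_ne_nil _ _)
        | cons a0 t =>
          cases t with
          | nil => simp [pvModLast, pvConsHead]
          | cons b0 t2 =>
            cases t2 with
            | nil =>
              simp only [pvModLast, pvConsHead]
              rw [pv_ofChars_ws_left hint₁, pv_ofChars_ws_right hint₂]
            | cons c0 t3 =>
              have hml := pvModLast_ne_nil w₂ (c0 :: t3) (by simp)
              cases hml2 : pvModLast w₂ (c0 :: t3) with
              | nil => exact absurd hml2 hml
              | cons d0 t4 =>
                simp [pvModLast, pvConsHead, hml2]
      · -- no colon
        have hpre' : pvOkCore cs = true := by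
          rcases hpre with h | h
          · exact absurd h hcs
          · rw [if_neg hc] at h; exact h
        have hsome : (PySem.Int.ofChars? cs).isSome = true := by
          unfold pvOkCore at hpre'
          rwa [if_neg hcol] at hpre'
        have hqne : PySem.Chars.strip cs ≠ [] := by
          intro h
          have := pv_ofChars_all_ws hdom (pv_strip_nil_ws h)
          rw [this] at hsome; cases hsome
        have hqcol : ¬ PySem.Chars.isIn [':'] (PySem.Chars.strip cs) = true := by
          intro h
          exact hcol ((pv_isIn_singleton _ _).2 (pv_mem_strip ((pv_isIn_singleton _ _).1 h)))
        rw [if_neg hcol]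
        simp only [pvContrib, if_neg hqne, if_neg hqcol]
        rw [pv_ofChars_strip hdom]

-- ===== VERDICT =====
theorem parse_thread_config_spec : Claim_equal_parse_thread_config := by
  intro thread_str hdom hpre
  unfold Spec_parse_thread_config parse_thread_config parse_thread_config_alt
  apply pv_core_eq
  · intro x hx
    unfold Dom_parse_thread_config pvDomStr at hdom
    exact List.all_eq_true.1 hdom x hx
  · exact hpre

theorem parse_thread_config_raises : Claim_raises_parse_thread_config := by
  unfold Claim_raises_parse_thread_config
  constructor
  · intro thread_str hdom hr hpre
    obtain ⟨hne, hnc, hstrip⟩ := hr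
    have hdom' : ∀ x ∈ thread_str.toList, pvDomChar x = true := by
      unfold Dom_parse_thread_config pvDomStr at hdom
      exact fun x hx => List.all_eq_true.1 hdom x hx
    have hws := pv_strip_nil_ws hstrip
    rcases hpre with h | h
    · exact hne h
    · rw [if_neg (by rw [hnc]; simp)] at h
      unfold pvOkCore at h
      have hcol : ¬ PySem.Chars.isIn [':'] thread_str.toList = true := by
        intro hcol
        have hmem := (pv_isIn_singleton _ _).1 hcol
        have := hws ':' hmem
        rw [pv_isspace_colon] at this; cases this
      rw [if_neg hcol] at h
      rw [pv_ofChars_all_ws hdom' hws] at h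
      cases h
  · refine ⟨by decide, ⟨by decide, by decide, ?_⟩, by decide⟩
    decide

-- self-check that the raise-witness claim is really about the stated witness value
theorem pv_raise_witness_ok :
    parse_thread_config_alt pvRaiseWitness_parse_thread_config = pvRaiseWitnessOut_parse_thread_config :=
  parse_thread_config_raises.2.2.2
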